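-- pv_equiv track=rewrite | github.com/VyuginAK/Python_lab_work | LabWork1/Task1.py | min_odd_digit
-- ===== SOURCE A (Python) =====
-- def min_odd_digit(n):
--     n = abs(n)  # Работаем с модулем числа (чтобы избежать проблем с отрицательными числами)
--     min_digit = None  # Пока не нашли ни одной нечётной цифры
--
--     for digit_str in str(n):  # Перебираем каждую цифру в числе (как строку)
--         digit = int(digit_str)  # Преобразуем в число
--         if digit % 2 != 0:  # Если цифра нечётная
--             if min_digit is None or digit < min_digit:  # Если это первая нечётная или меньше найденной
--                 min_digit = digit
--
--     return min_digit if min_digit is not None else -1  # Возвращаем -1, если нечётных цифр нет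
-- ===== SOURCE B (Python) =====
-- def min_odd_digit(n):
--     s = str(abs(n))
--     for d in (1, 3, 5, 7, 9):
--         if str(d) in s:
--             return d
--     return -1
-- ===== Notes on version B (the rewrite author's own statement) =====
-- stated objective: idiomatic
-- what changed: B iterates over the answer space (the five odd digits in ascending order) and returns the first one whose character occurs in str(abs(n)), instead of scanning every digit of the number while tracking a running minimum accumulator.
import Mathlib
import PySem

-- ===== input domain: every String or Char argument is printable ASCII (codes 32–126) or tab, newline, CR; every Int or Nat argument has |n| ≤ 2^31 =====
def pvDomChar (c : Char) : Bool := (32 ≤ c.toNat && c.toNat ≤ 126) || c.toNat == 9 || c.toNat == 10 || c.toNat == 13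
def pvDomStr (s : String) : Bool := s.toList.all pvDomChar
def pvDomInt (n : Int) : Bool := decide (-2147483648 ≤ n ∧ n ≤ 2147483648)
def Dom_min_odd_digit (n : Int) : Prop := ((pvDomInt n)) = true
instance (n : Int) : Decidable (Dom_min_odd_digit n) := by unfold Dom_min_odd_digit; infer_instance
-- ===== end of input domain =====

-- B tests the five candidate odd digits in ascending order against str(abs(n)) instead of
-- scanning every digit with a running-minimum accumulator (idiomatic rewrite, similar cost).


-- ===== PORT A =====
-- loop body: digit = int(digit_str); if digit % 2 != 0: if min_digit is None or digit < min_digit: …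
-- int(digit_str) is PySem.Int.ofChars? on the one-character string; every character of str(abs(n))
-- is a decimal digit, so the conversion always succeeds and the .getD 0 default is never reached
-- (proved digit by digit in aStep_eq below).
def aStep (acc : Option Int) (c : Char) : Option Int :=
  let digit : Int := (PySem.Int.ofChars? [c]).getD 0
  if PySem.Int.mod digit 2 ≠ 0 then
    match acc with
    | none => some digit
    | some m => if digit < m then some digit else some m
  else acc

def min_odd_digit (n : Int) : Int :=
  let m : Int := |n|                                      -- n = abs(n)
  let res := (PySem.Int.toStr m).toList.foldl aStep none  -- for digit_str in str(n): …
  match res with                                          -- return min_digit if … is not None else -1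
  | some d => d
  | none => -1

-- ===== PORT B =====
-- s = str(abs(n)); for d in (1, 3, 5, 7, 9): if str(d) in s: return d;  return -1
def bLoop (s : List Char) : List Int → Int
  | [] => -1
  | d :: ds => if PySem.Chars.isIn (PySem.Int.toChars d) s then d else bLoop s ds

def min_odd_digit_alt (n : Int) : Int :=
  bLoop (PySem.Int.toStr |n|).toList [1, 3, 5, 7, 9]

-- ===== PRECONDITION & SPEC =====
def Spec_min_odd_digit (n : Int) (out : Int) : Prop := out = min_odd_digit_alt n
instance (n : Int) (out : Int) : Decidable (Spec_min_odd_digit n out) := by unfold Spec_min_odd_digit; infer_instance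

-- ===== CLAIM (what is proved, stated in full; the proofs are below) =====
def Claim_equal_min_odd_digit : Prop := ∀ (n : Int), Dom_min_odd_digit n → Spec_min_odd_digit n (min_odd_digit n)

-- ===== LEMMAS AND PROOFS =====

def digitsL : List Char := ['0','1','2','3','4','5','6','7','8','9']

-- option-valued minimum (the accumulator combine of A's loop)
def omin : Option Int → Option Int → Option Int
  | none, b => b
  | a, none => a
  | some x, some y => some (min x y)

-- the odd-digit value a single character contributes
def oddVal (c : Char) : Option Int :=
  if c = '1' then some 1 else if c = '3' then some 3 else if c = '5' then some 5
  else if c = '7' then some 7 else if c = '9' then some 9 else none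

-- the smallest odd digit whose character occurs in l (common normal form of both ports)
def F (l : List Char) : Option Int :=
  if '1' ∈ l then some 1 else if '3' ∈ l then some 3 else if '5' ∈ l then some 5
  else if '7' ∈ l then some 7 else if '9' ∈ l then some 9 else none

theorem omin_none_left (b : Option Int) : omin none b = b := rfl

theorem omin_none_right (a : Option Int) : omin a none = a := by cases a <;> rfl

theorem omin_assoc (a b c : Option Int) : omin (omin a b) c = omin a (omin b c) := by
  cases a <;> cases b <;> cases c <;> simp [omin, min_assoc]

theorem digitChar_mem (m : Nat) (h : m < 10) : Nat.digitChar m ∈ digitsL := by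
  interval_cases m <;> decide

theorem toDigitsCore_mem (fuel : Nat) :
    ∀ (n : Nat) (ds : List Char), (∀ c ∈ ds, c ∈ digitsL) →
    ∀ c ∈ Nat.toDigitsCore 10 fuel n ds, c ∈ digitsL := by
  induction fuel with
  | zero => intro n ds hds c hc; exact hds c hc
  | succ fuel ih =>
    intro n ds hds c hc
    rw [Nat.toDigitsCore] at hc
    by_cases h0 : n / 10 = 0
    · simp only [h0, if_pos] at hc
      rcases List.mem_cons.mp hc with h | h
      · subst h; exact digitChar_mem _ (Nat.mod_lt _ (by omega))
      · exact hds c h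
    · simp only [if_neg h0] at hc
      refine ih (n / 10) _ ?_ c hc
      intro c' hc'
      rcases List.mem_cons.mp hc' with h | h
      · subst h; exact digitChar_mem _ (Nat.mod_lt _ (by omega))
      · exact hds c' h

theorem toChars_digits (m : Int) (h : 0 ≤ m) :
    ∀ c ∈ PySem.Int.toChars m, c ∈ digitsL := by
  intro c hc
  unfold PySem.Int.toChars at hc
  rw [if_neg (by omega)] at hc
  exact toDigitsCore_mem _ _ _ (by simp) c hc

-- aStep with the int() conversion of a concrete digit character evaluated
theorem aStep_eval (acc : Option Int) (c : Char) (d : Int)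
    (h : (PySem.Int.ofChars? [c]).getD 0 = d) :
    aStep acc c =
      if PySem.Int.mod d 2 ≠ 0 then
        match acc with
        | none => some d
        | some m => if d < m then some d else some m
      else acc := by
  unfold aStep; rw [h]

theorem aStep_eq (c : Char) (hc : c ∈ digitsL) (acc : Option Int) :
    aStep acc c = omin acc (oddVal c) := by
  fin_cases hc <;>
    [ rw [aStep_eval acc _ 0 (by decide), if_neg (by decide)]
    ; rw [aStep_eval acc _ 1 (by decide), if_pos (by decide)]
    ; rw [aStep_eval acc _ 2 (by decide), if_neg (by decide)]
    ; rw [aStep_eval acc _ 3 (by decide), if_pos (by decide)]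
    ; rw [aStep_eval acc _ 4 (by decide), if_neg (by decide)]
    ; rw [aStep_eval acc _ 5 (by decide), if_pos (by decide)]
    ; rw [aStep_eval acc _ 6 (by decide), if_neg (by decide)]
    ; rw [aStep_eval acc _ 7 (by decide), if_pos (by decide)]
    ; rw [aStep_eval acc _ 8 (by decide), if_neg (by decide)]
    ; rw [aStep_eval acc _ 9 (by decide), if_pos (by decide)] ] <;>
  cases acc <;> simp [omin, oddVal, min_def] <;> split_ifs <;> first | rfl | omega

theorem F_cons (c : Char) (l : List Char) : F (c :: l) = omin (oddVal c) (F l) := by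
  by_cases c1 : c = '1' <;> by_cases c3 : c = '3' <;> by_cases c5 : c = '5' <;>
    by_cases c7 : c = '7' <;> by_cases c9 : c = '9' <;>
  by_cases h1 : ('1':Char) ∈ l <;> by_cases h3 : ('3':Char) ∈ l <;>
    by_cases h5 : ('5':Char) ∈ l <;> by_cases h7 : ('7':Char) ∈ l <;>
    by_cases h9 : ('9':Char) ∈ l <;>
  simp_all [F, oddVal, omin, eq_comm]

theorem fold_eq (l : List Char) (hl : ∀ c ∈ l, c ∈ digitsL) (acc : Option Int) :
    l.foldl aStep acc = omin acc (F l) := by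
  induction l generalizing acc with
  | nil => simp [F, omin_none_right]
  | cons c l ih =>
    have hc := hl c (List.mem_cons_self ..)
    have hl' : ∀ c ∈ l, c ∈ digitsL := fun c h => hl c (List.mem_cons_of_mem _ h)
    calc (c :: l).foldl aStep acc = l.foldl aStep (aStep acc c) := rfl
      _ = omin (aStep acc c) (F l) := ih hl' _
      _ = omin (omin acc (oddVal c)) (F l) := by rw [aStep_eq c hc]
      _ = omin acc (omin (oddVal c) (F l)) := omin_assoc ..
      _ = omin acc (F (c :: l)) := by rw [F_cons]

theorem singleton_infix {a : Char} {l : List Char} : [a] <:+: l ↔ a ∈ l := by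
  constructor
  · intro h; simpa using h.sublist
  · intro h
    obtain ⟨s, t, rfl⟩ := List.append_of_mem h
    exact ⟨s, t, by simp⟩

theorem bLoop_eq (s : List Char) :
    bLoop s [1, 3, 5, 7, 9] = (match F s with | some d => d | none => -1) := by
  have key : ∀ a : Char, (PySem.Chars.isIn [a] s = true) ↔ a ∈ s := fun a =>
    (PySem.Chars.isIn_iff_infix _ _).trans singleton_infix
  simp only [bLoop, F,
    show PySem.Int.toChars 1 = ['1'] from rfl, show PySem.Int.toChars 3 = ['3'] from rfl,
    show PySem.Int.toChars 5 = ['5'] from rfl, show PySem.Int.toChars 7 = ['7'] from rfl,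
    show PySem.Int.toChars 9 = ['9'] from rfl]
  by_cases h1 : ('1':Char) ∈ s <;> by_cases h3 : ('3':Char) ∈ s <;>
    by_cases h5 : ('5':Char) ∈ s <;> by_cases h7 : ('7':Char) ∈ s <;>
    by_cases h9 : ('9':Char) ∈ s <;>
  simp [key, h1, h3, h5, h7, h9]

-- ===== VERDICT (by name: the statement is the Claim_ definition above) =====
theorem min_odd_digit_spec : Claim_equal_min_odd_digit := by
  intro n _
  unfold Spec_min_odd_digit min_odd_digit min_odd_digit_alt
  rw [PySem.Int.toList_toStr, bLoop_eq]
  show (match List.foldl aStep none (PySem.Int.toStr |n|).toList with | some d => d | none => -1) = _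
  rw [PySem.Int.toList_toStr, fold_eq _ (toChars_digits _ (abs_nonneg n)) none, omin_none_left]
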